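-- pv_equiv track=rewrite | github.com/leandro-araujo-silva/Aprendendo-Python | numeros-ordenados-huxley.py | last_ordered_number
-- ===== SOURCE A (Python) =====
-- def last_ordered_number(n):
--     # Converter o número de entrada para uma lista de dígitos
--     digits = list(str(n))
--
--     # Percorrer a lista de dígitos da direita para a esquerda
--     for i in range(len(digits) - 1, 0, -1):
--         if digits[i] < digits[i - 1]:
--             # Se o dígito atual for menor que o anterior,
--             # decrementar o dígito anterior e ajustar os dígitos à direita para 9
--             digits[i - 1] = str(int(digits[i - 1]) - 1)
--             digits[i:] = ['9'] * (len(digits) - i)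
--
--     # Construir o número ordenado a partir da lista de dígitos
--     last_number = int(''.join(digits))
--
--     return last_number
-- ===== SOURCE B (Python) =====
-- def last_ordered_number(n):
--     s = list(str(n))
--     # forward pass: find the first descent
--     j = 0
--     while j + 1 < len(s) and s[j] <= s[j + 1]:
--         j += 1
--     if j + 1 < len(s):
--         # descent at j: decrement s[j], then cascade leftwards while order is still broken
--         s[j] = str(int(s[j]) - 1)
--         while j > 0 and s[j - 1] > s[j]:
--             j -= 1
--             s[j] = str(int(s[j]) - 1)
--         # everything to the right of the cascade becomes '9'
--         s[j + 1:] = ['9'] * (len(s) - j - 1)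
--     return int(''.join(s))
-- ===== Notes on version B (the rewrite author's own statement) =====
-- stated objective: alternative
-- what changed: A scans the digits right-to-left, decrementing and rewriting the whole suffix to nines at every local descent it meets; B scans left-to-right to find the FIRST descent, decrements there and cascades the decrement leftwards only while order is still broken, then does one single nine-fill of the suffix.
import Mathlib
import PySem

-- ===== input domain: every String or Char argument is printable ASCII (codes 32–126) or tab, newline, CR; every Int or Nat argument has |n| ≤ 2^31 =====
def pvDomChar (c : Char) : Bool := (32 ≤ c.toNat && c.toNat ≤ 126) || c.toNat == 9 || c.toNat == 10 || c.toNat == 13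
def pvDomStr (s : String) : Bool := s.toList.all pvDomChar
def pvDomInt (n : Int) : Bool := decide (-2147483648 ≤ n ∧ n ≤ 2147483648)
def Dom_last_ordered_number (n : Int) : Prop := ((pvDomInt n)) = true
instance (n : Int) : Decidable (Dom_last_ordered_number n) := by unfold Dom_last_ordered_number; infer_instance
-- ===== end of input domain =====

-- B replaces A's right-to-left rewrite-suffix-at-every-descent loop by a left-to-right search for the FIRST descent followed by a leftward decrement cascade and one single nine-fill (alternative algorithm, same values).


-- ===== PORT A =====
-- list(str(n)) : Python's list of 1-char strings, kept as List String (Python's str '<' = Lean's String '<', both code-point lexicographic)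
def pvDigits (n : Int) : List String :=
  (PySem.Int.toStr n).toList.map (fun c => String.ofList [c])

-- str(int(d) - 1); int() never raises on the values this program feeds it (digit strings), so getD 0 is exact there
def pvDecStr (d : String) : String :=
  PySem.Int.toStr ((PySem.Int.ofStr? d).getD 0 - 1)

-- loop body of A at index i (called with 1 ≤ i < len, so plain getD indexing is exact):
-- digits[i-1] = str(int(digits[i-1]) - 1); digits[i:] = ['9'] * (len(digits) - i)
def pvBodyA (ds : List String) (i : Nat) : List String :=
  if ds.getD i "" < ds.getD (i - 1) "" then
    ((ds.set (i - 1) (pvDecStr (ds.getD (i - 1) ""))).take i)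
      ++ List.replicate (ds.length - i) "9"
  else ds

-- for i in range(len(digits)-1, 0, -1): processes indices i, i-1, …, 1
def pvLoopA (ds : List String) : Nat → List String
  | 0 => ds
  | i + 1 => pvLoopA (pvBodyA ds (i + 1)) i

def last_ordered_number (n : Int) : Int :=
  let digits := pvDigits n
  let digits := pvLoopA digits (digits.length - 1)
  -- int(''.join(digits)); never raises here, getD 0 exact
  (PySem.Int.ofStr? (PySem.Str.join "" digits)).getD 0

-- ===== PORT B =====
-- while j + 1 < len(s) and s[j] <= s[j+1]: j += 1   (forward search for the first descent)
def pvFindB (s : List String) (j : Nat) : Nat :=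
  if h : j + 1 < s.length then
    (if s.getD j "" ≤ s.getD (j + 1) "" then pvFindB s (j + 1) else j)
  else j
termination_by s.length - j
decreasing_by omega

-- while j > 0 and s[j-1] > s[j]: j -= 1; s[j] = str(int(s[j])-1)   (leftward decrement cascade)
def pvCascB (t : List String) : Nat → List String × Nat
  | 0 => (t, 0)
  | jj + 1 =>
    if t.getD (jj + 1) "" < t.getD jj "" then
      pvCascB (t.set jj (pvDecStr (t.getD jj ""))) jj
    else (t, jj + 1)

def last_ordered_number_alt (n : Int) : Int :=
  let s := pvDigits n
  let j := pvFindB s 0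
  if j + 1 < s.length then
    -- s[j] = str(int(s[j])-1); cascade; s[j+1:] = ['9'] * (len(s)-j-1)
    let s1 := s.set j (pvDecStr (s.getD j ""))
    let r := pvCascB s1 j
    (PySem.Int.ofStr? (PySem.Str.join ""
        (r.1.take (r.2 + 1) ++ List.replicate (r.1.length - (r.2 + 1)) "9"))).getD 0
  else
    (PySem.Int.ofStr? (PySem.Str.join "" s)).getD 0

-- ===== PRECONDITION & SPEC =====
def Spec_last_ordered_number (n : Int) (out : Int) : Prop := out = last_ordered_number_alt n
instance (n : Int) (out : Int) : Decidable (Spec_last_ordered_number n out) := by unfold Spec_last_ordered_number; infer_instance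

-- ===== CLAIM (what is proved, stated in full; the proofs are below) =====
def Claim_equal_last_ordered_number : Prop := ∀ (n : Int), Dom_last_ordered_number n → Spec_last_ordered_number n (last_ordered_number n)

-- ===== LEMMAS AND PROOFS =====

-- ---- small getD/set helpers ----
theorem pvGetD_set_self (l : List String) (m : Nat) (a : String) (h : m < l.length) :
    (l.set m a).getD m "" = a := by
  simp [List.getD, List.getElem?_set, h]

theorem pvGetD_set_ne (l : List String) (m p : Nat) (a : String) (h : p ≠ m) :
    (l.set m a).getD p "" = l.getD p "" := by
  simp [List.getD, List.getElem?_set, Ne.symm h]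

-- ---- phase 1: A's loop equals a pure right-to-left scan (decrement + leftmost-violation marker) followed by one nine-fill ----
def pvFill (s : List String) (m : Nat) : List String :=
  s.take m ++ List.replicate (s.length - m) "9"

def pvScanBody (st : List String × Nat) (i : Nat) : List String × Nat :=
  if st.1.getD (i - 1) "" > st.1.getD i "" then
    (st.1.set (i - 1) (pvDecStr (st.1.getD (i - 1) "")), i)
  else st

def pvScan : List String × Nat → Nat → List String × Nat
  | st, 0 => st
  | st, i + 1 => pvScan (pvScanBody st (i + 1)) i

theorem pvFill_length (s : List String) (m : Nat) (h : m ≤ s.length) :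
    (pvFill s m).length = s.length := by
  simp [pvFill]; omega

theorem pvFill_getD (s : List String) (m j : Nat) (hj : j < m) (hm : m ≤ s.length) :
    (pvFill s m).getD j "" = s.getD j "" := by
  have hjl : j < s.length := lt_of_lt_of_le hj hm
  simp [pvFill, List.getD, List.getElem?_append, hj, hjl, List.length_take, Nat.min_eq_left hm]

theorem pvStep_rel (s : List String) (m i : Nat) (hi : i + 1 < m) (hm : m ≤ s.length) :
    pvBodyA (pvFill s m) (i + 1) =
      pvFill (pvScanBody (s, m) (i + 1)).1 (pvScanBody (s, m) (i + 1)).2 := by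
  have h1 : (pvFill s m).getD (i + 1) "" = s.getD (i + 1) "" := pvFill_getD s m (i + 1) hi hm
  have h0 : (pvFill s m).getD i "" = s.getD i "" := pvFill_getD s m i (by omega) hm
  unfold pvBodyA pvScanBody
  simp only [Nat.add_sub_cancel, h1, h0, GT.gt]
  split
  · have hlen : (pvFill s m).length = s.length := pvFill_length s m hm
    simp only [hlen]
    congr 1
    · apply List.ext_getElem
      · simp [pvFill]; omega
      · intro j hj1 hj2
        have hjm : j < i + 1 := by
          simp only [pvFill, List.length_take, List.length_append, List.length_set,
            List.length_replicate] at hj1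
          omega
        have hjs : j < s.length := by omega
        have hjm' : j < (pvFill s m).length := by rw [pvFill_length s m hm]; omega
        rw [List.getElem_take, List.getElem_take,
          ← List.getD_eq_getElem _ "" (by simpa using hjm'),
          ← List.getD_eq_getElem _ "" (by simpa using hjs)]
        by_cases hji : j = i
        · subst hji
          rw [pvGetD_set_self _ _ _ hjm', pvGetD_set_self _ _ _ hjs]
        · rw [pvGetD_set_ne _ _ _ _ hji, pvGetD_set_ne _ _ _ _ hji]
          exact pvFill_getD s m j (by omega) hm
    · simp [pvFill]
  · rfl

theorem pvLoop_rel (i : Nat) : ∀ (s : List String) (m : Nat), i < m → m ≤ s.length →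
    pvLoopA (pvFill s m) i =
      pvFill (pvScan (s, m) i).1 (pvScan (s, m) i).2
    ∧ (pvScan (s, m) i).1.length = s.length ∧ (pvScan (s, m) i).2 ≤ s.length := by
  induction i with
  | zero => intro s m _ hm; exact ⟨rfl, rfl, hm⟩
  | succ i ih =>
    intro s m hi hm
    have hstep := pvStep_rel s m i hi hm
    unfold pvLoopA pvScan
    rw [hstep]
    unfold pvScanBody
    split
    · have hlen : (s.set i (pvDecStr (s.getD i ""))).length = s.length := by simp
      have := ih (s.set i (pvDecStr (s.getD i ""))) (i + 1) (by omega) (by omega)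
      simpa [pvScanBody, hlen] using this
    · exact (by simpa using ih s m (by omega) hm)

theorem pvFill_self (s : List String) : pvFill s s.length = s := by
  simp [pvFill]

theorem loopA_eq_fill (s : List String) (k : Nat) (hk : k + 1 = s.length) :
    pvLoopA s k = pvFill (pvScan (s, s.length) k).1 (pvScan (s, s.length) k).2 := by
  obtain ⟨h1, _, _⟩ := pvLoop_rel k s s.length (by omega) le_rfl
  rw [pvFill_self] at h1
  exact h1

-- ---- the right-to-left "violation" predicate pvV and the leftmost-violation index pvM of A's scan ----
def pvV (s : List String) (k : Nat) (i : Nat) : Bool :=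
  if h : 1 ≤ i ∧ i ≤ k then
    decide ((if pvV s k (i + 1) = true then pvDecStr (s.getD i "") else s.getD i "") < s.getD (i - 1) "")
  else false
termination_by k + 1 - i
decreasing_by omega

def pvM (s : List String) (k : Nat) (i : Nat) : Nat :=
  if h : i + 1 ≤ k then
    (if pvV s k (i + 1) = true then i + 1 else pvM s k (i + 1))
  else s.length
termination_by k - i
decreasing_by omega

theorem pvV_eq (s : List String) (k i : Nat) (h1 : 1 ≤ i) (h2 : i ≤ k) :
    pvV s k i = decide ((if pvV s k (i + 1) = true then pvDecStr (s.getD i "") else s.getD i "") < s.getD (i - 1) "") := by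
  rw [pvV]; simp [h1, h2]

theorem pvV_of_gt (s : List String) (k i : Nat) (h : k < i) : pvV s k i = false := by
  rw [pvV]; simp; omega

theorem pvM_top (s : List String) (k : Nat) : pvM s k k = s.length := by
  rw [pvM, dif_neg (show ¬ k + 1 ≤ k by omega)]

theorem pvM_eq_of (s : List String) (k : Nat) :
    ∀ i m', i < m' → m' ≤ k → pvV s k m' = true →
      (∀ q, i < q → q < m' → pvV s k q = false) → pvM s k i = m' := by
  intro i m' h1 h2 h3 h4
  generalize hd : m' - i = d
  induction d generalizing i with
  | zero => omega
  | succ d ih =>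
    rw [pvM]
    have hik : i + 1 ≤ k := by omega
    simp only [hik, dif_pos]
    by_cases he : i + 1 = m'
    · subst he; rw [h3]; simp
    · have hv : pvV s k (i + 1) = false := h4 (i + 1) (by omega) (by omega)
      rw [hv]
      simp only [Bool.false_eq_true, if_false]
      exact ih (i + 1) (by omega) (fun q hq1 hq2 => h4 q (by omega) hq2) (by omega)

theorem pvM_eq_len (s : List String) (k : Nat)
    (h : ∀ q, 1 ≤ q → q ≤ k → pvV s k q = false) : ∀ i, pvM s k i = s.length := by
  intro i
  generalize hd : k - i = d
  induction d generalizing i with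
  | zero => rw [pvM, dif_neg (show ¬ i + 1 ≤ k by omega)]
  | succ d ih =>
    rw [pvM]
    have hik : i + 1 ≤ k := by omega
    simp only [hik, dif_pos, h (i + 1) (by omega) hik]
    simpa using ih (i + 1) (by omega)

-- ---- characterization of A's scan in terms of pvV / pvM ----
theorem pvScan_char (s : List String) (k : Nat) (hk : k + 1 = s.length) :
    ∀ i, i ≤ k → ∀ t : List String, t.length = s.length →
      (∀ p, p < i → t.getD p "" = s.getD p "") →
      (t.getD i "" = if pvV s k (i + 1) = true then pvDecStr (s.getD i "") else s.getD i "") →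
      (pvScan (t, pvM s k i) i).2 = pvM s k 0 ∧
      (pvScan (t, pvM s k i) i).1.length = s.length ∧
      ∀ p, (pvScan (t, pvM s k i) i).1.getD p "" =
        if p < i then (if pvV s k (p + 1) = true then pvDecStr (s.getD p "") else s.getD p "") else t.getD p "" := by
  intro i
  induction i with
  | zero =>
    intro _ t hlen _ _
    exact ⟨rfl, hlen, fun p => by simp [pvScan]⟩
  | succ i ih =>
    intro hik t hlen hlow hcur
    have hik' : i + 1 ≤ k := hik
    have hti : t.getD i "" = s.getD i "" := hlow i (by omega)
    have hcond : (t.getD i "" > t.getD (i + 1) "") =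
        ((if pvV s k (i + 2) = true then pvDecStr (s.getD (i + 1) "") else s.getD (i + 1) "") < s.getD i "") := by
      rw [hti, hcur]
    have hvv : pvV s k (i + 1) =
        decide ((if pvV s k (i + 2) = true then pvDecStr (s.getD (i + 1) "") else s.getD (i + 1) "") < s.getD i "") := by
      rw [pvV_eq s k (i + 1) (by omega) hik']; simp
    have hm : pvM s k i = if pvV s k (i + 1) = true then i + 1 else pvM s k (i + 1) := by
      rw [pvM]; simp [hik']
    by_cases hc : (if pvV s k (i + 2) = true then pvDecStr (s.getD (i + 1) "") else s.getD (i + 1) "") < s.getD i ""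
    · have hv1 : pvV s k (i + 1) = true := by rw [hvv]; exact decide_eq_true hc
      have hcb : t.getD i "" > t.getD (i + 1) "" := by rw [hcond] at *; exact hc
      have hm' : pvM s k i = i + 1 := by rw [hm, hv1]; simp
      have hstep : pvScan (t, pvM s k (i + 1)) (i + 1)
          = pvScan (t.set i (pvDecStr (t.getD i "")), i + 1) i := by
        show pvScan (pvScanBody (t, pvM s k (i + 1)) (i + 1)) i = _
        unfold pvScanBody
        simp only [Nat.add_sub_cancel]
        rw [if_pos hcb]
      rw [hstep]
      have hilen : i < t.length := by omega
      have ht' : (t.set i (pvDecStr (t.getD i ""))).length = s.length := by simp [hlen]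
      have hlow' : ∀ p, p < i → (t.set i (pvDecStr (t.getD i ""))).getD p "" = s.getD p "" :=
        fun p hp => by rw [pvGetD_set_ne t i p _ (by omega)]; exact hlow p (by omega)
      have hcur' : (t.set i (pvDecStr (t.getD i ""))).getD i "" =
          if pvV s k (i + 1) = true then pvDecStr (s.getD i "") else s.getD i "" := by
        rw [pvGetD_set_self t i _ hilen, hti, hv1]; simp
      have := ih (by omega) (t.set i (pvDecStr (t.getD i ""))) ht' hlow' hcur'
      rw [hm'] at this
      refine ⟨this.1, this.2.1, fun q => ?_⟩
      rw [this.2.2 q]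
      by_cases hp : q < i
      · rw [if_pos hp, if_pos (show q < i + 1 by omega)]
      · by_cases hpi : q = i
        · subst hpi
          rw [if_neg hp, if_pos (Nat.lt_succ_self q)]
          exact hcur'
        · rw [if_neg hp, if_neg (show ¬ q < i + 1 by omega), pvGetD_set_ne t i q _ (by omega)]
    · have hv1 : pvV s k (i + 1) = false := by rw [hvv]; simpa using hc
      have hcb : ¬ (t.getD i "" > t.getD (i + 1) "") := by rw [hcond] at *; exact hc
      have hm' : pvM s k i = pvM s k (i + 1) := by rw [hm, hv1]; simp
      have hstep : pvScan (t, pvM s k (i + 1)) (i + 1)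
          = pvScan (t, pvM s k (i + 1)) i := by
        show pvScan (pvScanBody (t, pvM s k (i + 1)) (i + 1)) i = _
        unfold pvScanBody
        simp only [Nat.add_sub_cancel]
        rw [if_neg hcb]
      rw [hstep]
      have hcur' : t.getD i "" = if pvV s k (i + 1) = true then pvDecStr (s.getD i "") else s.getD i "" := by
        rw [hti, hv1]; simp
      have := ih (by omega) t hlen (fun p hp => hlow p (by omega)) hcur'
      rw [hm'] at this
      refine ⟨this.1, this.2.1, fun q => ?_⟩
      rw [this.2.2 q]
      by_cases hp : q < i
      · rw [if_pos hp, if_pos (show q < i + 1 by omega)]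
      · by_cases hpi : q = i
        · subst hpi
          rw [if_neg hp, if_pos (Nat.lt_succ_self q)]
          exact hcur'
        · rw [if_neg hp, if_neg (show ¬ q < i + 1 by omega)]

-- ---- characterization of B's forward search ----
theorem pvFindB_spec (s : List String) : ∀ j, j ≤ pvFindB s j ∧
    (∀ p, j ≤ p → p < pvFindB s j → p + 1 < s.length ∧ s.getD p "" ≤ s.getD (p + 1) "") ∧
    ¬ (pvFindB s j + 1 < s.length ∧ s.getD (pvFindB s j) "" ≤ s.getD (pvFindB s j + 1) "") := by
  intro j
  generalize hd : s.length - j = d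
  induction d generalizing j with
  | zero =>
    have hnc : ¬ (j + 1 < s.length) := by omega
    rw [pvFindB, dif_neg hnc]
    exact ⟨le_rfl, fun p h1 h2 => absurd h2 (by omega), fun h => absurd h.1 hnc⟩
  | succ d ih =>
    rw [pvFindB]
    by_cases h1 : j + 1 < s.length
    · simp only [h1, dif_pos]
      by_cases h2 : s.getD j "" ≤ s.getD (j + 1) ""
      · rw [if_pos h2]
        obtain ⟨ha, hb, hc⟩ := ih (j + 1) (by omega)
        refine ⟨by omega, fun p hp1 hp2 => ?_, hc⟩
        by_cases hpj : p = j
        · subst hpj; exact ⟨h1, h2⟩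
        · exact hb p (by omega) hp2
      · rw [if_neg h2]
        exact ⟨le_rfl, fun p hp1 hp2 => absurd hp2 (by omega), fun h => h2 h.2⟩
    · rw [dif_neg h1]
      exact ⟨le_rfl, fun p hp1 hp2 => absurd hp2 (by omega), fun h => h1 h.1⟩

-- ---- characterization of B's cascade ----
theorem pvCascB_char (s : List String) :
    ∀ (j : Nat) (t : List String), t.length = s.length →
      (∀ p, p < j → t.getD p "" = s.getD p "") →
      t.getD j "" = pvDecStr (s.getD j "") →
      j < s.length →
      (pvCascB t j).2 ≤ j ∧
      (pvCascB t j).1.length = s.length ∧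
      (∀ p, p < (pvCascB t j).2 → (pvCascB t j).1.getD p "" = s.getD p "") ∧
      (∀ p, (pvCascB t j).2 ≤ p → p ≤ j → (pvCascB t j).1.getD p "" = pvDecStr (s.getD p "")) ∧
      (∀ p, j < p → (pvCascB t j).1.getD p "" = t.getD p "") ∧
      (∀ q, (pvCascB t j).2 < q → q ≤ j → pvDecStr (s.getD q "") < s.getD (q - 1) "") ∧
      ((pvCascB t j).2 = 0 ∨ ¬ (pvDecStr (s.getD (pvCascB t j).2 "") < s.getD ((pvCascB t j).2 - 1) "")) := by
  intro j
  induction j with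
  | zero =>
    intro t hlen _ hcur _
    refine ⟨le_rfl, hlen, fun p hp => absurd hp (Nat.not_lt_zero p),
      fun p hp1 hp2 => ?_, fun p _ => rfl,
      fun q h1 h2 => absurd (lt_of_lt_of_le h1 h2) (lt_irrefl 0), Or.inl rfl⟩
    have hp0 : p = 0 := Nat.le_zero.mp hp2
    subst hp0; exact hcur
  | succ jj ih =>
    intro t hlen hlow hcur hjlen
    have htjj : t.getD jj "" = s.getD jj "" := hlow jj (by omega)
    show (pvCascB t (jj+1)).2 ≤ jj + 1 ∧ _
    unfold pvCascB
    by_cases hc : t.getD (jj + 1) "" < t.getD jj ""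
    · rw [if_pos hc]
      have hjj : jj < t.length := by omega
      have h1 : (t.set jj (pvDecStr (t.getD jj ""))).length = s.length := by simp [hlen]
      have h2 : ∀ p, p < jj → (t.set jj (pvDecStr (t.getD jj ""))).getD p "" = s.getD p "" :=
        fun p hp => by rw [pvGetD_set_ne t jj p _ (by omega)]; exact hlow p (by omega)
      have h3 : (t.set jj (pvDecStr (t.getD jj ""))).getD jj "" = pvDecStr (s.getD jj "") := by
        rw [pvGetD_set_self t jj _ hjj, htjj]
      obtain ⟨c1, c2, c3, c4, c5, c6, c7⟩ := ih (t.set jj (pvDecStr (t.getD jj ""))) h1 h2 h3 (by omega)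
      refine ⟨by omega, c2, c3, fun p hp1 hp2 => ?_, fun p hp => ?_, fun q hq1 hq2 => ?_, c7⟩
      · by_cases hpj : p ≤ jj
        · exact c4 p hp1 hpj
        · have hpe : p = jj + 1 := by omega
          rw [hpe, c5 (jj + 1) (by omega), pvGetD_set_ne t jj (jj + 1) _ (by omega)]
          exact hcur
      · rw [c5 p (by omega), pvGetD_set_ne t jj p _ (by omega)]
      · by_cases hqj : q ≤ jj
        · exact c6 q hq1 hqj
        · have hqe : q = jj + 1 := by omega
          rw [hqe]
          simp only [Nat.add_sub_cancel]
          rw [← hcur, ← htjj]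
          exact hc
    · rw [if_neg hc]
      refine ⟨le_rfl, hlen, fun p hp => hlow p hp, fun p hp1 hp2 => ?_, fun p _ => rfl,
        fun q h1 h2 => absurd h2 (by omega), ?_⟩
      · have : p = jj + 1 := by omega
        subst this; exact hcur
      · right
        simp only [Nat.add_sub_cancel]
        rw [← htjj, ← hcur]
        exact hc

-- ---- digit shape of str(n) and the decrement fact ----
theorem pvDigitChar_isDigit (m : Nat) (h : m < 10) : (Nat.digitChar m).isDigit = true := by
  interval_cases m <;> decide

theorem pvToDigitsCore_digit : ∀ (f : Nat) (n : Nat) (acc : List Char),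
    (∀ c ∈ acc, c.isDigit = true) → ∀ c ∈ Nat.toDigitsCore 10 f n acc, c.isDigit = true := by
  intro f
  induction f with
  | zero => intro n acc hacc c hc; exact hacc c hc
  | succ f ih =>
    intro n acc hacc c hc
    rw [show Nat.toDigitsCore 10 (f + 1) n acc
        = if n / 10 = 0 then (n % 10).digitChar :: acc
          else Nat.toDigitsCore 10 f (n / 10) ((n % 10).digitChar :: acc) from rfl] at hc
    by_cases h0 : n / 10 = 0
    · rw [if_pos h0] at hc
      rcases List.mem_cons.mp hc with hc | hc
      · rw [hc]; exact pvDigitChar_isDigit _ (Nat.mod_lt _ (by omega))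
      · exact hacc c hc
    · rw [if_neg h0] at hc
      refine ih _ _ ?_ c hc
      intro c' hc'
      rcases List.mem_cons.mp hc' with hc' | hc'
      · rw [hc']; exact pvDigitChar_isDigit _ (Nat.mod_lt _ (by omega))
      · exact hacc c' hc'

theorem pvToDigits_digit (n : Nat) : ∀ c ∈ Nat.toDigits 10 n, c.isDigit = true := by
  unfold Nat.toDigits
  exact pvToDigitsCore_digit _ _ [] (by simp)

theorem pvDigits_tail (n : Int) (p : Nat) (h1 : 1 ≤ p) (h2 : p < (pvDigits n).length) :
    ∃ c : Char, (pvDigits n).getD p "" = String.ofList [c] ∧ c.isDigit = true := by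
  unfold pvDigits at h2 ⊢
  rw [List.length_map] at h2
  have hto : (PySem.Int.toStr n).toList = PySem.Int.toChars n := PySem.Int.toList_toStr n
  have h2' : p < (PySem.Int.toChars n).length := by rw [← hto]; exact h2
  refine ⟨(PySem.Int.toChars n)[p], ?_, ?_⟩
  · rw [List.getD_eq_getElem _ _ (by simpa using h2)]
    simp only [List.getElem_map]
    exact congrArg (fun c => String.ofList [c]) (List.getElem_of_eq hto _)
  · unfold PySem.Int.toChars
    split
    · cases p with
      | zero => omega
      | succ q =>
        simp only [List.getElem_cons_succ]
        exact pvToDigits_digit _ _ (List.getElem_mem _)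
    · exact pvToDigits_digit _ _ (List.getElem_mem _)

theorem pvChar_digit_cases (c : Char) (h : c.isDigit = true) :
    c = '0' ∨ c = '1' ∨ c = '2' ∨ c = '3' ∨ c = '4' ∨ c = '5' ∨ c = '6' ∨ c = '7' ∨ c = '8' ∨ c = '9' := by
  simp [Char.isDigit, UInt32.le_iff_toNat_le] at h
  have hc : c.toNat = 48 ∨ c.toNat = 49 ∨ c.toNat = 50 ∨ c.toNat = 51 ∨ c.toNat = 52 ∨ c.toNat = 53
      ∨ c.toNat = 54 ∨ c.toNat = 55 ∨ c.toNat = 56 ∨ c.toNat = 57 := by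
    unfold Char.toNat at *; omega
  have he := (Char.ofNat_toNat c).symm
  rcases hc with h' | h' | h' | h' | h' | h' | h' | h' | h' | h' <;> rw [h'] at he <;>
    simp only [he] <;> decide

theorem pvDec_lt (c : Char) (h : c.isDigit = true) : pvDecStr (String.ofList [c]) < String.ofList [c] := by
  rcases pvChar_digit_cases c h with h | h | h | h | h | h | h | h | h | h <;> subst h <;>
    rw [String.lt_iff_toList_lt] <;> decide

-- ---- the violation chain produced by B's cascade is exactly where pvV holds ----
theorem pvChainV (s : List String) (k J r2 : Nat) (hJk : J + 1 ≤ k)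
    (hdesc : s.getD (J + 1) "" < s.getD J "")
    (hdec : pvDecStr (s.getD (J + 1) "") < s.getD (J + 1) "")
    (hchain : ∀ q, r2 < q → q ≤ J → pvDecStr (s.getD q "") < s.getD (q - 1) "") :
    ∀ i, r2 + 1 ≤ i → i ≤ J + 1 → pvV s k i = true := by
  intro i h1 h2
  generalize hd : J + 1 - i = d
  induction d generalizing i with
  | zero =>
    have hi : i = J + 1 := by omega
    subst hi
    rw [pvV_eq s k (J + 1) (by omega) hJk]
    simp only [Nat.add_sub_cancel]
    cases hv : pvV s k (J + 1 + 1) <;> simp only [hv, Bool.false_eq_true, if_false, if_true]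
    · exact decide_eq_true hdesc
    · exact decide_eq_true (lt_trans hdec hdesc)
  | succ d ih =>
    have hiJ : i ≤ J := by omega
    have hv : pvV s k (i + 1) = true := ih (i + 1) (by omega) (by omega) (by omega)
    rw [pvV_eq s k i (by omega) (by omega), hv]
    simp only [if_true]
    exact decide_eq_true (hchain i (by omega) hiJ)

theorem pvFalseV (s : List String) (k J r2 : Nat) (hJk : J + 1 ≤ k) (hr2J : r2 ≤ J)
    (hle : ∀ q, 1 ≤ q → q < r2 → ¬ (s.getD q "" < s.getD (q - 1) ""))
    (hstop : r2 = 0 ∨ ¬ (pvDecStr (s.getD r2 "") < s.getD (r2 - 1) ""))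
    (hvr2succ : pvV s k (r2 + 1) = true) :
    ∀ q, 1 ≤ q → q ≤ r2 → pvV s k q = false := by
  intro q h1 h2
  generalize hd : r2 - q = d
  induction d generalizing q with
  | zero =>
    have hq : q = r2 := by omega
    rcases hstop with h | h
    · omega
    · rw [pvV_eq s k q h1 (by omega), hq, hvr2succ]
      simp only [if_true]
      simpa using h
  | succ d ih =>
    have hv : pvV s k (q + 1) = false := ih (q + 1) (by omega) (by omega) (by omega)
    rw [pvV_eq s k q h1 (by omega), hv]
    simp only [Bool.false_eq_true, if_false]
    simpa using hle q h1 (by omega)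

theorem pvAllFalseV (s : List String) (k : Nat) (hk : k + 1 = s.length)
    (hmono : ∀ p, p + 1 < s.length → ¬ (s.getD (p + 1) "" < s.getD p "")) :
    ∀ q, 1 ≤ q → q ≤ k → pvV s k q = false := by
  intro q h1 h2
  generalize hd : k - q = d
  induction d generalizing q with
  | zero =>
    have hq : q = k := by omega
    rw [pvV_eq s k q h1 (by omega), hq, pvV_of_gt s k (k + 1) (by omega)]
    simp only [Bool.false_eq_true, if_false]
    have := hmono (k - 1) (by omega)
    rw [show k - 1 + 1 = k by omega] at this
    simpa using this
  | succ d ih =>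
    have hv : pvV s k (q + 1) = false := ih (q + 1) (by omega) (by omega) (by omega)
    rw [pvV_eq s k q h1 (by omega), hv]
    simp only [Bool.false_eq_true, if_false]
    have := hmono (q - 1) (by omega)
    rw [show q - 1 + 1 = q by omega] at this
    simpa using this

-- ---- assembly ----
theorem pvMain (n : Int) : last_ordered_number n = last_ordered_number_alt n := by
  simp only [last_ordered_number, last_ordered_number_alt]
  rcases hL : (pvDigits n).length with _ | k
  · have h : pvDigits n = [] := List.eq_nil_of_length_eq_zero hL
    rw [h]
    simp [pvLoopA, pvFindB]
  · have hk : k + 1 = (pvDigits n).length := hL.symm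
    rw [Nat.add_sub_cancel, hk]
    rw [loopA_eq_fill (pvDigits n) k hk]
    obtain ⟨hm2, hlen2, hpt⟩ := pvScan_char (pvDigits n) k hk k le_rfl (pvDigits n) rfl
      (fun p hp => rfl)
      (by rw [pvV_of_gt (pvDigits n) k (k + 1) (by omega)]; simp)
    obtain ⟨hfa, hfb, hfc⟩ := pvFindB_spec (pvDigits n) 0
    by_cases hdesc : pvFindB (pvDigits n) 0 + 1 < (pvDigits n).length
    · rw [if_pos hdesc, ← pvM_top (pvDigits n) k]
      have hJk : pvFindB (pvDigits n) 0 + 1 ≤ k := by omega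
      have hlt : (pvDigits n).getD (pvFindB (pvDigits n) 0 + 1) "" < (pvDigits n).getD (pvFindB (pvDigits n) 0) "" := by
        rcases lt_or_ge ((pvDigits n).getD (pvFindB (pvDigits n) 0 + 1) "") ((pvDigits n).getD (pvFindB (pvDigits n) 0) "") with h | h
        · exact h
        · exact absurd ⟨hdesc, h⟩ hfc
      obtain ⟨d1, d2, d3, d4, d5, d6, d7⟩ := pvCascB_char (pvDigits n) (pvFindB (pvDigits n) 0)
        ((pvDigits n).set (pvFindB (pvDigits n) 0) (pvDecStr ((pvDigits n).getD (pvFindB (pvDigits n) 0) "")))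
        (by simp)
        (fun p hp => pvGetD_set_ne (pvDigits n) (pvFindB (pvDigits n) 0) p _ (by omega))
        (pvGetD_set_self (pvDigits n) (pvFindB (pvDigits n) 0) _ (by omega))
        (by omega)
      obtain ⟨c, hcEq, hcDig⟩ := pvDigits_tail n (pvFindB (pvDigits n) 0 + 1) (by omega) (by omega)
      have hdec : pvDecStr ((pvDigits n).getD (pvFindB (pvDigits n) 0 + 1) "") < (pvDigits n).getD (pvFindB (pvDigits n) 0 + 1) "" := by
        rw [hcEq]; exact pvDec_lt c hcDig
      have hvtrue := pvChainV (pvDigits n) k (pvFindB (pvDigits n) 0)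
        (pvCascB ((pvDigits n).set (pvFindB (pvDigits n) 0) (pvDecStr ((pvDigits n).getD (pvFindB (pvDigits n) 0) ""))) (pvFindB (pvDigits n) 0)).2
        hJk hlt hdec d6
      have hvfalse := pvFalseV (pvDigits n) k (pvFindB (pvDigits n) 0)
        (pvCascB ((pvDigits n).set (pvFindB (pvDigits n) 0) (pvDecStr ((pvDigits n).getD (pvFindB (pvDigits n) 0) ""))) (pvFindB (pvDigits n) 0)).2
        hJk d1
        (fun q h1q h2q => by
          have hmem := hfb (q - 1) (by omega) (by omega)
          rw [show q - 1 + 1 = q by omega] at hmem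
          exact not_lt_of_ge hmem.2)
        d7 (hvtrue _ le_rfl (by omega))
      have hM : pvM (pvDigits n) k 0 =
          (pvCascB ((pvDigits n).set (pvFindB (pvDigits n) 0) (pvDecStr ((pvDigits n).getD (pvFindB (pvDigits n) 0) ""))) (pvFindB (pvDigits n) 0)).2 + 1 :=
        pvM_eq_of (pvDigits n) k 0 _ (by omega) (by omega)
          (hvtrue _ le_rfl (by omega)) (fun q hq1 hq2 => hvfalse q (by omega) (by omega))
      rw [hm2, hM]
      have hlist : pvFill (pvScan (pvDigits n, pvM (pvDigits n) k k) k).1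
            ((pvCascB ((pvDigits n).set (pvFindB (pvDigits n) 0) (pvDecStr ((pvDigits n).getD (pvFindB (pvDigits n) 0) ""))) (pvFindB (pvDigits n) 0)).2 + 1)
          = (pvCascB ((pvDigits n).set (pvFindB (pvDigits n) 0) (pvDecStr ((pvDigits n).getD (pvFindB (pvDigits n) 0) ""))) (pvFindB (pvDigits n) 0)).1.take
              ((pvCascB ((pvDigits n).set (pvFindB (pvDigits n) 0) (pvDecStr ((pvDigits n).getD (pvFindB (pvDigits n) 0) ""))) (pvFindB (pvDigits n) 0)).2 + 1)
            ++ List.replicate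
              ((pvCascB ((pvDigits n).set (pvFindB (pvDigits n) 0) (pvDecStr ((pvDigits n).getD (pvFindB (pvDigits n) 0) ""))) (pvFindB (pvDigits n) 0)).1.length
                - ((pvCascB ((pvDigits n).set (pvFindB (pvDigits n) 0) (pvDecStr ((pvDigits n).getD (pvFindB (pvDigits n) 0) ""))) (pvFindB (pvDigits n) 0)).2 + 1)) "9" := by
        unfold pvFill
        congr 1
        swap
        · rw [hlen2, d2]
        apply List.ext_getElem
        · rw [List.length_take, List.length_take, hlen2, d2]
        · intro j hj1 hj2
          have hjlt : j < (pvCascB ((pvDigits n).set (pvFindB (pvDigits n) 0) (pvDecStr ((pvDigits n).getD (pvFindB (pvDigits n) 0) ""))) (pvFindB (pvDigits n) 0)).2 + 1 := by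
            rw [List.length_take] at hj1; omega
          have hjlen : j < (pvDigits n).length := by
            rw [List.length_take, hlen2] at hj1; omega
          rw [List.getElem_take, List.getElem_take,
            ← List.getD_eq_getElem _ "" (by rw [hlen2]; exact hjlen),
            ← List.getD_eq_getElem _ "" (by rw [d2]; exact hjlen)]
          rw [hpt j, if_pos (show j < k by omega)]
          rcases Nat.lt_or_ge j (pvCascB ((pvDigits n).set (pvFindB (pvDigits n) 0) (pvDecStr ((pvDigits n).getD (pvFindB (pvDigits n) 0) ""))) (pvFindB (pvDigits n) 0)).2 with hj | hj
          · rw [hvfalse (j + 1) (by omega) (by omega)]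
            simp only [Bool.false_eq_true, if_false]
            exact (d3 j hj).symm
          · have hje : j = (pvCascB ((pvDigits n).set (pvFindB (pvDigits n) 0) (pvDecStr ((pvDigits n).getD (pvFindB (pvDigits n) 0) ""))) (pvFindB (pvDigits n) 0)).2 := by omega
            rw [hje, hvtrue _ le_rfl (by omega)]
            simp only [if_true]
            exact (d4 _ le_rfl (by omega)).symm
      rw [hlist]
    · rw [if_neg hdesc, ← pvM_top (pvDigits n) k]
      have hmono : ∀ p, p + 1 < (pvDigits n).length → ¬ ((pvDigits n).getD (p + 1) "" < (pvDigits n).getD p "") := by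
        intro p hp
        have hpJ : p < pvFindB (pvDigits n) 0 := by omega
        exact not_lt_of_ge (hfb p (Nat.zero_le p) hpJ).2
      have hvall := pvAllFalseV (pvDigits n) k hk hmono
      have hM : pvM (pvDigits n) k 0 = (pvDigits n).length := pvM_eq_len (pvDigits n) k hvall 0
      have hu : (pvScan (pvDigits n, pvM (pvDigits n) k k) k).1 = pvDigits n := by
        apply List.ext_getElem
        · rw [hlen2]
        · intro j hj1 hj2
          rw [← List.getD_eq_getElem _ "" hj1, ← List.getD_eq_getElem _ "" hj2, hpt j]
          by_cases hjk : j < k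
          · rw [if_pos hjk, hvall (j + 1) (by omega) (by omega)]
            simp
          · rw [if_neg hjk]
      rw [hm2, hM, hu, pvFill_self]

-- ===== VERDICT (by name: the statement is the Claim_ definition above) =====
theorem last_ordered_number_spec : Claim_equal_last_ordered_number := by
  intro n _
  unfold Spec_last_ordered_number
  exact pvMain n
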